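-- pv_equiv track=rewrite | github.com/PaulDepraz/commons | list.py | flatten
-- ===== SOURCE A (Python) =====
-- def flatten(a):
--     """
--     Joins a sequence of sequences into a single sequence.  (One-level flattening.)
--     E.g., join([(1,2,3), [4, 5], [6, (7, 8, 9), 10]]) = [1,2,3,4,5,6,(7,8,9),10]
--     This is very efficient, especially when the subsequences are long.
--     """
--     n = sum([len(b) for b in a])
--     l = [None]*n
--     i = 0
--     for b in a:
--         j = i+len(b)
--         l[i:j] = b
--         i = j
--     return l
-- ===== SOURCE B (Python) =====
-- def flatten(a):
--     """
--     Joins a sequence of sequences into a single sequence.  (One-level flattening.)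
--     Single element-wise pass: no length pre-pass, no preallocation, no index bookkeeping.
--     """
--     return [x for b in a for x in b]
-- ===== Notes on version B (the rewrite author's own statement) =====
-- stated objective: simpler
-- what changed: Replaced A's two-phase scheme (sum all lengths, preallocate [None]*n, slice-assign each block at a running offset) by a single nested comprehension appending each element directly.
import Mathlib
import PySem

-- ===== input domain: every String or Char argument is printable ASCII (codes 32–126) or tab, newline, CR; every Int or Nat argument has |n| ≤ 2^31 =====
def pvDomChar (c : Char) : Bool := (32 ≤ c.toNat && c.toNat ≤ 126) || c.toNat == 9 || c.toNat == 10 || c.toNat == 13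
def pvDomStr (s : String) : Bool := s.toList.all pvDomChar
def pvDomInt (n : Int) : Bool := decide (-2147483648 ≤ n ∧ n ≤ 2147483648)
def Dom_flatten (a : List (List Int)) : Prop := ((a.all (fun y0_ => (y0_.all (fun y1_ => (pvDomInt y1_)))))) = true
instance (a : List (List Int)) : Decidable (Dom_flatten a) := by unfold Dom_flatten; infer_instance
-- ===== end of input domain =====

-- ===== PORT A =====
def flatten (a : List (List Int)) : List Int :=
  -- n = sum([len(b) for b in a])
  let n : Nat := (a.map (fun b => b.length)).sum
  -- l = [None]*n : placeholder list; every position is overwritten by the slice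
  -- assignments below (the placeholder value 0 stands for None and is never returned)
  let l : List Int := List.replicate n 0
  -- for b in a: j = i+len(b); l[i:j] = b; i = j   (slice assignment as take/append/drop)
  (a.foldl (fun (st : List Int × Nat) b =>
      let i := st.2
      let j := i + b.length
      (st.1.take i ++ b ++ st.1.drop j, j)) (l, 0)).1

-- ===== PORT B =====
def flatten_alt (a : List (List Int)) : List Int :=
  -- [x for b in a for x in b]
  a.flatMap (fun b => b.map (fun x => x))

-- ===== PRECONDITION & SPEC =====
def Spec_flatten (a : List (List Int)) (out : List Int) : Prop := out = flatten_alt a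
instance (a : List (List Int)) (out : List Int) : Decidable (Spec_flatten a out) := by unfold Spec_flatten; infer_instance

-- ===== CLAIM (what is proved, stated in full; the proofs are below) =====
def Claim_equal_flatten : Prop := ∀ (a : List (List Int)), Dom_flatten a → Spec_flatten a (flatten a)

-- ===== LEMMAS AND PROOFS =====

-- ===== VERDICT (by name: the statement is the Claim_ definition above) =====
-- Loop invariant: starting from (acc ++ zeros-for-rest, acc.length), the fold
-- produces acc ++ flat rest.
lemma flatten_loop (rest : List (List Int)) : ∀ (acc : List Int),
    (rest.foldl (fun (st : List Int × Nat) (b : List Int) =>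
        let i := st.2
        let j := i + b.length
        (st.1.take i ++ b ++ st.1.drop j, j))
      (acc ++ List.replicate ((rest.map (fun (c : List Int) => c.length)).sum) 0, acc.length)).1
    = acc ++ rest.flatMap (fun b => b.map (fun x => x)) := by
  induction rest with
  | nil => intro acc; simp
  | cons b rest ih =>
    intro acc
    set s : Nat := (rest.map (fun (c : List Int) => c.length)).sum with hs
    have h1 : (acc ++ List.replicate (b.length + s) 0).take acc.length = acc := by
      simp
    have h2 : (acc ++ List.replicate (b.length + s) 0).drop (acc.length + b.length) = List.replicate s 0 := by
      rw [← List.drop_drop]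
      simp
    simp only [List.foldl_cons, List.map_cons, List.sum_cons, ← hs]
    rw [h1, h2]
    have h3 := ih (acc ++ b)
    simp only [List.length_append, List.append_assoc] at h3 ⊢
    rw [h3]
    simp

theorem flatten_spec : Claim_equal_flatten := by
  intro a _
  unfold Spec_flatten flatten flatten_alt
  have := flatten_loop a []
  simpa using this
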